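-- pv_equiv track=rewrite | github.com/Mythicool/sugarcereal | dist/fancy_serial_analyzer.py | check_ladder
-- ===== SOURCE A (Python) =====
-- def check_ladder(digits):
--     patterns = []
--     d = [int(x) for x in digits]
--     # Full ascending
--     if d == sorted(d) and d == list(range(d[0], d[0]+8)):
--         patterns.append(("ASCENDING LADDER", "full 8-digit"))
--         return patterns
--     # Full descending
--     if d == sorted(d, reverse=True) and d == list(range(d[0], d[0]-8, -1)):
--         patterns.append(("DESCENDING LADDER", "full 8-digit"))
--         return patterns
--     # Partial ladders (6, 5, 4 digits)
--     best = 0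
--     for start in range(len(d)):
--         for direction in [1, -1]:
--             length = 1
--             while start + length < len(d) and d[start+length] == d[start] + direction*length:
--                 length += 1
--             if length > best:
--                 best = length
--     if best >= 6:
--         patterns.append((f"{best}-DIGIT LADDER", "consecutive sequential run"))
--     elif best == 5:
--         patterns.append(("5-DIGIT LADDER", "consecutive sequential run"))
--     elif best == 4:
--         patterns.append(("4-DIGIT LADDER", "consecutive sequential run"))
--
--     # Broken / scattered ladder (all 8 distinct digits 1-8 or 0-7 present)
--     if set(digits) == set('12345678') or set(digits) == set('01234567') or set(digits) == set('23456789'):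
--         patterns.append(("BROKEN LADDER", "all 8 sequential digits, scattered"))
--     return patterns
-- ===== SOURCE B (Python) =====
-- def check_ladder(digits):
--     d = [int(x) for x in digits]
--     # Full ascending: the range list is already ascending, so the sorted() check is redundant.
--     if d == list(range(d[0], d[0] + 8)):
--         return [("ASCENDING LADDER", "full 8-digit")]
--     # Full descending
--     if d == list(range(d[0], d[0] - 8, -1)):
--         return [("DESCENDING LADDER", "full 8-digit")]
--     # Single right-to-left pass: asc/desc = length of the ascending/descending
--     # run starting at the current position; best = max run length seen so far.
--     best = 0
--     asc = 0
--     desc = 0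
--     prev = None
--     for v in reversed(d):
--         asc = asc + 1 if prev == v + 1 else 1
--         desc = desc + 1 if prev == v - 1 else 1
--         prev = v
--         best = max(best, asc, desc)
--     patterns = []
--     if best >= 4:
--         patterns.append((f"{best}-DIGIT LADDER", "consecutive sequential run"))
--     if set(digits) in (set('12345678'), set('01234567'), set('23456789')):
--         patterns.append(("BROKEN LADDER", "all 8 sequential digits, scattered"))
--     return patterns
-- ===== Notes on version B (the rewrite author's own statement) =====
-- stated objective: faster
-- what changed: The O(n^2) nested start-direction scan with an inner while loop is replaced by a single right-to-left pass maintaining the lengths of the ascending and descending runs starting at the current position, and the redundant sorted() checks and the 6/5/4 emission chain are collapsed.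
import Mathlib
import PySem

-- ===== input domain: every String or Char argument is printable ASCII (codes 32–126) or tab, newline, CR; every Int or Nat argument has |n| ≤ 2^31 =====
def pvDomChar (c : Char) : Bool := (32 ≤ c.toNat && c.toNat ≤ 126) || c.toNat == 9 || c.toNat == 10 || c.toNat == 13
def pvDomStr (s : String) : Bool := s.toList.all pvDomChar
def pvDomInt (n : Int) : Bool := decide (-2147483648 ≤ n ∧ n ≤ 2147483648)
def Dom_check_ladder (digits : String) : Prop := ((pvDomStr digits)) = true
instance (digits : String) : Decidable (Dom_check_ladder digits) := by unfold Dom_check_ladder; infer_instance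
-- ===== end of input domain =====

-- B replaces A's O(n^2) nested start×direction scan of `best` by one right-to-left pass
-- keeping the ascending/descending run lengths starting at the current position (objective: faster).

-- ===== PORT A =====
-- int(x) for a single character x (exact on Pre_'s digit characters)
def pvIntChar (c : Char) : Int := (PySem.Int.ofStr? (String.ofList [c])).getD 0

-- the inner `while` loop of A: length starts at 1, fuel = len(d) bounds the iterations
def pvAGo (d : List Int) (start : Nat) (dir : Int) : Nat → Nat → Nat
  | 0, len => len
  | fuel+1, len =>
      if start + len < d.length ∧
         PySem.List.pyGetD d ((start + len : Nat) : Int) 0 =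
           PySem.List.pyGetD d ((start : Nat) : Int) 0 + dir * (len : Int)
      then pvAGo d start dir fuel (len+1) else len

def check_ladder (digits : String) : List (String × String) :=
  let d : List Int := digits.toList.map pvIntChar
  let d0 : Int := PySem.List.pyGetD d 0 0   -- d[0]; exact under Pre_ (d nonempty)
  if d = PySem.List.sorted d (fun x => x) false ∧ d = PySem.List.pyRange d0 (d0 + 8) 1 then
    [("ASCENDING LADDER", "full 8-digit")]
  else if d = PySem.List.sorted d (fun x => x) true ∧ d = PySem.List.pyRange d0 (d0 - 8) (-1) then
    [("DESCENDING LADDER", "full 8-digit")]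
  else
    -- for start in range(len(d)) — Nat indices 0..len-1, exact since len(d) ≥ 0
    let best : Nat := (List.range d.length).foldl (fun best start =>
      ([1, -1] : List Int).foldl (fun best dir =>
        let length := pvAGo d start dir d.length 1
        if length > best then length else best) best) 0
    let patterns : List (String × String) :=
      if best ≥ 6 then [(PySem.Int.toStr (best : Int) ++ "-DIGIT LADDER", "consecutive sequential run")]
      else if best = 5 then [("5-DIGIT LADDER", "consecutive sequential run")]
      else if best = 4 then [("4-DIGIT LADDER", "consecutive sequential run")]
      else []
    if PySem.Set.equal (PySem.Set.ofList digits.toList) (PySem.Set.ofList "12345678".toList)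
       || PySem.Set.equal (PySem.Set.ofList digits.toList) (PySem.Set.ofList "01234567".toList)
       || PySem.Set.equal (PySem.Set.ofList digits.toList) (PySem.Set.ofList "23456789".toList)
    then patterns ++ [("BROKEN LADDER", "all 8 sequential digits, scattered")]
    else patterns

-- ===== PORT B =====
-- one step of B's right-to-left pass; state = (best, asc, desc, prev)
def pvBStep (s : Nat × Nat × Nat × Option Int) (v : Int) : Nat × Nat × Nat × Option Int :=
  let asc := if s.2.2.2 = some (v + 1) then s.2.1 + 1 else 1
  let desc := if s.2.2.2 = some (v - 1) then s.2.2.1 + 1 else 1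
  (max (max s.1 asc) desc, asc, desc, some v)

def check_ladder_alt (digits : String) : List (String × String) :=
  let d : List Int := digits.toList.map pvIntChar
  let d0 : Int := PySem.List.pyGetD d 0 0   -- d[0]; exact under Pre_ (d nonempty)
  if d = PySem.List.pyRange d0 (d0 + 8) 1 then
    [("ASCENDING LADDER", "full 8-digit")]
  else if d = PySem.List.pyRange d0 (d0 - 8) (-1) then
    [("DESCENDING LADDER", "full 8-digit")]
  else
    let st := d.reverse.foldl pvBStep (0, 0, 0, none)
    let best := st.1
    let patterns : List (String × String) :=
      if best ≥ 4 then [(PySem.Int.toStr (best : Int) ++ "-DIGIT LADDER", "consecutive sequential run")]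
      else []
    if PySem.Set.equal (PySem.Set.ofList digits.toList) (PySem.Set.ofList "12345678".toList)
       || PySem.Set.equal (PySem.Set.ofList digits.toList) (PySem.Set.ofList "01234567".toList)
       || PySem.Set.equal (PySem.Set.ofList digits.toList) (PySem.Set.ofList "23456789".toList)
    then patterns ++ [("BROKEN LADDER", "all 8 sequential digits, scattered")]
    else patterns

-- ===== PRECONDITION & SPEC =====
-- Pre_ excludes exactly the inputs where Python A raises: the empty string (IndexError at d[0])
-- and any non-digit character (ValueError in int(x)).
def Pre_check_ladder (digits : String) : Prop := PySem.Str.strIsdigit digits = true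
instance (digits : String) : Decidable (Pre_check_ladder digits) := by unfold Pre_check_ladder; infer_instance
def pvWitness_check_ladder : String := "12034567"

def Spec_check_ladder (digits : String) (out : List (String × String)) : Prop := out = check_ladder_alt digits
instance (digits : String) (out : List (String × String)) : Decidable (Spec_check_ladder digits out) := by unfold Spec_check_ladder; infer_instance

-- ===== CLAIM (what is proved, stated in full; the proofs are below) =====
def Claim_equal_check_ladder : Prop := ∀ (digits : String), Dom_check_ladder digits → Pre_check_ladder digits → Spec_check_ladder digits (check_ladder digits)

-- ===== LEMMAS AND PROOFS =====

-- run length starting at s in direction dir (the value A's while loop computes)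
def pvRunL (d : List Int) (dir : Int) (s : Nat) : Nat :=
  if h : s + 1 < d.length ∧
      PySem.List.pyGetD d ((s + 1 : Nat) : Int) 0 = PySem.List.pyGetD d ((s : Nat) : Int) 0 + dir
  then pvRunL d dir (s + 1) + 1 else 1
termination_by d.length - s
decreasing_by omega

-- how many further positions A's while condition keeps holding from offset len
def pvCnt (d : List Int) (dir : Int) (s : Nat) (len : Nat) : Nat :=
  if h : s + len < d.length ∧
      PySem.List.pyGetD d ((s + len : Nat) : Int) 0 =
        PySem.List.pyGetD d ((s : Nat) : Int) 0 + dir * (len : Int)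
  then pvCnt d dir s (len + 1) + 1 else 0
termination_by d.length - (s + len)
decreasing_by omega

theorem pvAGo_eq_cnt (d : List Int) (dir : Int) (s : Nat) :
    ∀ fuel len, d.length ≤ s + len + fuel →
      pvAGo d s dir fuel len = len + pvCnt d dir s len := by
  intro fuel
  induction fuel with
  | zero =>
    intro len hle
    rw [pvAGo, pvCnt, dif_neg (by rintro ⟨h1, -⟩; omega)]; omega
  | succ n ih =>
    intro len hle
    rw [pvAGo, pvCnt]
    split
    · rw [ih (len+1) (by omega)]; omega
    · omega
theorem pvCnt_shift (d : List Int) (dir : Int) (s : Nat)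
    (h : PySem.List.pyGetD d ((s + 1 : Nat) : Int) 0 = PySem.List.pyGetD d ((s : Nat) : Int) 0 + dir) :
    ∀ len, pvCnt d dir (s + 1) len = pvCnt d dir s (len + 1) := by
  intro len
  generalize hk : d.length - (s + 1 + len) = k
  induction k generalizing len with
  | zero =>
    conv_lhs => rw [pvCnt]
    conv_rhs => rw [pvCnt]
    rw [dif_neg (by rintro ⟨h1, -⟩; omega), dif_neg (by rintro ⟨h1, -⟩; omega)]
  | succ k ih =>
    have e1 : ((s + 1 + len : Nat) : Int) = ((s + (len + 1) : Nat) : Int) := by push_cast; ring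
    have hval : PySem.List.pyGetD d ((s + 1 : Nat) : Int) 0 + dir * (len : Int)
        = PySem.List.pyGetD d ((s : Nat) : Int) 0 + dir * ((len + 1 : Nat) : Int) := by
      rw [h]; push_cast; ring
    have hcond : (s + 1 + len < d.length ∧
        PySem.List.pyGetD d ((s + 1 + len : Nat) : Int) 0 =
          PySem.List.pyGetD d ((s + 1 : Nat) : Int) 0 + dir * (len : Int))
        ↔ (s + (len + 1) < d.length ∧
        PySem.List.pyGetD d ((s + (len + 1) : Nat) : Int) 0 =
          PySem.List.pyGetD d ((s : Nat) : Int) 0 + dir * ((len + 1 : Nat) : Int)) := by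
      rw [e1, hval]
      constructor <;> (rintro ⟨h1, h2⟩; exact ⟨by omega, h2⟩)
    conv_lhs => rw [pvCnt]
    conv_rhs => rw [pvCnt]
    by_cases hc : s + 1 + len < d.length ∧
        PySem.List.pyGetD d ((s + 1 + len : Nat) : Int) 0 =
          PySem.List.pyGetD d ((s + 1 : Nat) : Int) 0 + dir * (len : Int)
    · rw [dif_pos hc, dif_pos (hcond.mp hc), ih (len+1) (by omega)]
    · rw [dif_neg hc, dif_neg (fun hc2 => hc (hcond.mpr hc2))]


theorem pvRunL_eq_cnt (d : List Int) (dir : Int) : ∀ s, pvRunL d dir s = 1 + pvCnt d dir s 1 := by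
  intro s
  generalize hk : d.length - s = k
  induction k generalizing s with
  | zero =>
    rw [pvRunL, pvCnt, dif_neg (by rintro ⟨h1, -⟩; omega),
        dif_neg (by rintro ⟨h1, -⟩; omega)]
  | succ k ih =>
    conv_rhs => rw [pvCnt]
    rw [pvRunL]
    by_cases hc : s + 1 < d.length ∧
        PySem.List.pyGetD d ((s + 1 : Nat) : Int) 0 = PySem.List.pyGetD d ((s : Nat) : Int) 0 + dir
    · rw [dif_pos hc, dif_pos (by
        refine ⟨by omega, ?_⟩
        rw [hc.2]; push_cast; ring)]
      rw [ih (s+1) (by omega), ← pvCnt_shift d dir s hc.2 1]; omega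
    · rw [dif_neg hc, dif_neg (by
        rintro ⟨h1, h2⟩
        exact hc ⟨by omega, by rw [h2]; push_cast; ring⟩)]

def pvG (d : List Int) (s : Nat) : Nat := max (pvRunL d 1 s) (pvRunL d (-1) s)

theorem pvBestA_eq (d : List Int) :
    ((List.range d.length).foldl (fun best start =>
      ([1, -1] : List Int).foldl (fun best dir =>
        let length := pvAGo d start dir d.length 1
        if length > best then length else best) best) 0)
    = List.foldr (fun s b => max (pvG d s) b) 0 (List.range d.length) := by
  have hstep : (fun (best : Nat) (start : Nat) =>
      ([1, -1] : List Int).foldl (fun best dir =>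
        let length := pvAGo d start dir d.length 1
        if length > best then length else best) best)
      = fun b s => max b (pvG d s) := by
    funext b s
    simp only [List.foldl_cons, List.foldl_nil]
    rw [pvAGo_eq_cnt d 1 s d.length 1 (by omega), ← pvRunL_eq_cnt d 1 s,
        pvAGo_eq_cnt d (-1) s d.length 1 (by omega), ← pvRunL_eq_cnt d (-1) s]
    unfold pvG
    split_ifs <;> omega
  rw [hstep, ← List.foldl_map (f := pvG d) (g := fun b x => max b x),
      List.foldl_eq_foldr, ← List.foldr_map (f := pvG d) (g := fun x b => max x b)]


theorem pvB_inv (d : List Int) :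
    ∀ k s, s + k = d.length →
      ((d.drop s).reverse).foldl pvBStep (0, 0, 0, none) =
        if s < d.length then
          (List.foldr (fun t b => max (pvG d t) b) 0 (List.range' s (d.length - s)),
           pvRunL d 1 s, pvRunL d (-1) s, some (PySem.List.pyGetD d ((s : Nat) : Int) 0))
        else (0, 0, 0, none) := by
  intro k
  induction k with
  | zero =>
    intro s hs
    rw [if_neg (by omega), List.drop_of_length_le (by omega)]
    rfl
  | succ k ih =>
    intro s hs
    have hslt : s < d.length := by omega
    rw [if_pos hslt]
    rw [List.drop_eq_getElem_cons hslt, List.reverse_cons, List.foldl_append,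
        ih (s+1) (by omega)]
    have hget : PySem.List.pyGetD d ((s : Nat) : Int) 0 = d[s] := by
      rw [PySem.List.pyGetD_natCast]
      exact List.getD_eq_getElem d 0 hslt
    have hrange : List.range' s (d.length - s) = s :: List.range' (s+1) (d.length - (s+1)) := by
      rw [show d.length - s = (d.length - (s+1)) + 1 by omega, List.range'_succ]
    by_cases hlt : s + 1 < d.length
    · rw [if_pos hlt]
      have hget1 : PySem.List.pyGetD d ((s + 1 : Nat) : Int) 0 = d[s+1] := by
        rw [PySem.List.pyGetD_natCast]
        exact List.getD_eq_getElem d 0 hlt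
      simp only [List.foldl_cons, List.foldl_nil, pvBStep]
      have hasc : (if some (PySem.List.pyGetD d ((s + 1 : Nat) : Int) 0) = some (d[s] + 1)
          then pvRunL d 1 (s+1) + 1 else 1) = pvRunL d 1 s := by
        conv_rhs => rw [pvRunL]
        by_cases hv : d[s+1] = d[s] + 1
        · rw [if_pos (by rw [hget1, hv]), dif_pos ⟨hlt, by rw [hget1, hget, hv]⟩]
        · rw [if_neg (by rw [hget1]; exact fun hcon => hv (Option.some.inj hcon)),
              dif_neg (by rintro ⟨-, h2⟩; rw [hget1, hget] at h2; exact hv h2)]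
      have hdesc : (if some (PySem.List.pyGetD d ((s + 1 : Nat) : Int) 0) = some (d[s] - 1)
          then pvRunL d (-1) (s+1) + 1 else 1) = pvRunL d (-1) s := by
        conv_rhs => rw [pvRunL]
        by_cases hv : d[s+1] = d[s] - 1
        · rw [if_pos (by rw [hget1, hv]), dif_pos ⟨hlt, by rw [hget1, hget, hv]; ring⟩]
        · rw [if_neg (by rw [hget1]; exact fun hcon => hv (Option.some.inj hcon)),
              dif_neg (by rintro ⟨-, h2⟩; rw [hget1, hget] at h2; exact hv (by rw [h2]; ring))]
      rw [hget]
      refine Prod.ext ?_ (Prod.ext ?_ (Prod.ext ?_ ?_)) <;> simp only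
      · rw [hasc, hdesc, hrange, List.foldr_cons]
        unfold pvG
        omega
      · exact hasc
      · exact hdesc
    · rw [if_neg hlt]
      simp only [List.foldl_cons, List.foldl_nil, pvBStep]
      have h1 : pvRunL d 1 s = 1 := by rw [pvRunL, dif_neg (by rintro ⟨h1, -⟩; omega)]
      have h2 : pvRunL d (-1) s = 1 := by rw [pvRunL, dif_neg (by rintro ⟨h1, -⟩; omega)]
      have hrange2 : d.length - s = 1 := by omega
      rw [hget]
      refine Prod.ext ?_ (Prod.ext ?_ (Prod.ext ?_ ?_)) <;> simp only
      · rw [hrange2]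
        simp [pvG, h1, h2]
      · simp [h1]
      · simp [h2]

theorem pvBestB_eq (d : List Int) :
    (d.reverse.foldl pvBStep (0, 0, 0, none)).1
    = List.foldr (fun s b => max (pvG d s) b) 0 (List.range d.length) := by
  have := pvB_inv d d.length 0 (by omega)
  rw [List.drop_zero] at this
  rw [this]
  by_cases h : 0 < d.length
  · rw [if_pos h]
    simp [List.range_eq_range']
  · rw [if_neg h]
    have : d.length = 0 := by omega
    simp [this]


theorem pvAsc_sorted (d : List Int) (a : Int) (h : d = PySem.List.pyRange a (a + 8) 1) :
    d = PySem.List.sorted d (fun x => x) false := by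
  subst h
  exact Eq.symm (PySem.List.sorted_eq_self_of_pairwise _ (fun x => x)
    ((PySem.List.pairwise_lt_pyRange_one a (a+8)).imp le_of_lt))

theorem pvDesc_sorted (d : List Int) (a : Int) (h : d = PySem.List.pyRange a (a - 8) (-1)) :
    d = PySem.List.sorted d (fun x => x) true := by
  subst h
  refine Eq.symm (PySem.List.sorted_rev_eq_self_of_pairwise _ (fun x => x) ?_)
  rw [PySem.List.pyRange_neg_one]
  rw [List.pairwise_map]
  exact (List.pairwise_lt_range).imp (by intro x y hxy; simp only; omega)

theorem pvPatterns_eq (best : Nat) :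
    (if best ≥ 6 then [(PySem.Int.toStr (best : Int) ++ "-DIGIT LADDER", "consecutive sequential run")]
     else if best = 5 then [("5-DIGIT LADDER", "consecutive sequential run")]
     else if best = 4 then [("4-DIGIT LADDER", "consecutive sequential run")]
     else ([] : List (String × String)))
    = (if best ≥ 4 then [(PySem.Int.toStr (best : Int) ++ "-DIGIT LADDER", "consecutive sequential run")]
       else []) := by
  by_cases h6 : best ≥ 6
  · rw [if_pos h6, if_pos (by omega)]
  · rw [if_neg h6]
    by_cases h5 : best = 5
    · subst h5
      rw [if_pos rfl, if_pos (by omega)]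
      decide
    · rw [if_neg h5]
      by_cases h4 : best = 4
      · subst h4
        rw [if_pos rfl, if_pos (by omega)]
        decide
      · rw [if_neg h4, if_neg (by omega)]

-- ===== VERDICT (by name: the statement is the Claim_ definition above) =====
theorem check_ladder_spec : Claim_equal_check_ladder := by
  intro digits _ _
  unfold Spec_check_ladder check_ladder check_ladder_alt
  simp only
  set d : List Int := digits.toList.map pvIntChar with hd
  set d0 : Int := PySem.List.pyGetD d 0 0 with hd0
  by_cases hasc : d = PySem.List.pyRange d0 (d0 + 8) 1
  · rw [if_pos ⟨pvAsc_sorted d d0 hasc, hasc⟩, if_pos hasc]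
  · rw [if_neg (fun hc => hasc hc.2), if_neg hasc]
    by_cases hdesc : d = PySem.List.pyRange d0 (d0 - 8) (-1)
    · rw [if_pos ⟨pvDesc_sorted d d0 hdesc, hdesc⟩, if_pos hdesc]
    · rw [if_neg (fun hc => hdesc hc.2), if_neg hdesc]
      rw [pvBestA_eq d, ← pvBestB_eq d, pvPatterns_eq]
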